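-- pv_equiv track=rewrite | github.com/nhh2907/Algorithm | Programmers/Level_0/pushed_string.py | solution
-- ===== SOURCE A (Python) =====
-- def solution(A, B):
--     check = A
--     answer = 0
--     while A != B:
--         A = A[-1]+A[:-1]
--         answer += 1
--         if check == A:
--             return -1
--         else:
--             continue
--     return answer
-- ===== SOURCE B (Python) =====
-- def solution(A, B):
--     n = len(A)
--     if len(B) != n:
--         return -1
--     i = (A + A).rfind(B)
--     return -1 if i < 0 else n - i
-- ===== Notes on version B (the rewrite author's own statement) =====
-- stated objective: faster
-- what changed: Replaces the explicit rotate-and-compare loop (each step building a new string and comparing, O(n) per rotation) by a single substring search: the highest occurrence of B in A+A gives the minimal right-rotation count, after a length check.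
import Mathlib
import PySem

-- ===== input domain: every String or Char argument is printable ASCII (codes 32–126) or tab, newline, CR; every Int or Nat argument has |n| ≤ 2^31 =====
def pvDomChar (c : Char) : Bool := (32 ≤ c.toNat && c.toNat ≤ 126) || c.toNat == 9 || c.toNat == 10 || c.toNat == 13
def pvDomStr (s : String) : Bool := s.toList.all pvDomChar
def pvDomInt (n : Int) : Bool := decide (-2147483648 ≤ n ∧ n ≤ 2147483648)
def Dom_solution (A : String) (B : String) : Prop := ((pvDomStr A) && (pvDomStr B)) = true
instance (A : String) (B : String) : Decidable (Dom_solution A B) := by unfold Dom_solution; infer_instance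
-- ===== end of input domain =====

-- B replaces A's rotate-and-compare loop by a single substring search in A+A (Python's str.rfind);
-- equivalence is proved on all inputs where A returns (A raises IndexError only for A = "" with B ≠ "").

-- ===== PORT A =====
-- A = A[-1] + A[:-1]  (right rotation by one); on s = [] Python raises IndexError (excluded by Pre_)
def rotA (s : List Char) : List Char :=
  match PySem.List.pyGet? s (-1) with
  | some c => c :: PySem.List.slice s none (some (-1))
  | none => []

-- the while loop; fuel (length+1) is never exhausted: the rotation cycles back to `check` within length steps
def solutionLoop (check Bl : List Char) (fuel : Nat) (cur : List Char) (answer : Int) : Int :=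
  if cur = Bl then answer
  else
    match fuel with
    | 0 => -1
    | fuel' + 1 =>
      let cur' := rotA cur
      if check = cur' then -1
      else solutionLoop check Bl fuel' cur' (answer + 1)
termination_by fuel

def solution (A : String) (B : String) : Int :=
  let check := A.toList
  solutionLoop check B.toList (check.length + 1) check 0

-- ===== PORT B =====
-- hand port of Python str.rfind for the call Source B makes: highest i ≤ len s - len t with s[i:i+len t] == t, else -1
def rfindAux (s t : List Char) (i : Nat) : Int :=
  if (s.drop i).take t.length = t then (i : Int)
  else
    match i with
    | 0 => -1
    | i' + 1 => rfindAux s t i'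
termination_by i

def pyRfind (s t : List Char) : Int :=
  if t.length ≤ s.length then rfindAux s t (s.length - t.length) else -1

def solution_alt (A : String) (B : String) : Int :=
  let n := A.toList.length
  if B.toList.length ≠ n then -1
  else
    let i := pyRfind (A.toList ++ A.toList) B.toList
    if i < 0 then -1 else (n : Int) - i

-- ===== PRECONDITION & SPEC =====
-- excludes only A = "" with B ≠ "", where Python A raises IndexError on ''[-1]
def Pre_solution (A : String) (B : String) : Prop := A = "" → B = ""
instance (A : String) (B : String) : Decidable (Pre_solution A B) := by unfold Pre_solution; infer_instance

def pvWitness_solution : String × String := ("ab", "ba")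

def Spec_solution (A : String) (B : String) (out : Int) : Prop := out = solution_alt A B
instance (A : String) (B : String) (out : Int) : Decidable (Spec_solution A B out) := by unfold Spec_solution; infer_instance

-- ===== CLAIM (what is proved, stated in full; the proofs are below) =====
def Claim_equal_solution : Prop := ∀ (A : String) (B : String), Dom_solution A B → Pre_solution A B → Spec_solution A B (solution A B)
-- ===== LEMMAS AND PROOFS =====

-- the common reference computation: first k (scanning upward from m) with rot^k A = B, else -1
def specAux (L Bl : List Char) (k : Nat) : Int :=
  if L.length + 1 ≤ k then -1
  else if rotA^[k] L = Bl then (k : Int)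
  else specAux L Bl (k + 1)
termination_by L.length + 1 - k


lemma rotA_eq (L : List Char) (hL : L ≠ []) :
    rotA L = L.drop (L.length - 1) ++ L.take (L.length - 1) := by
  unfold rotA
  rw [PySem.List.pyGet?_neg_one, List.getLast?_eq_some_getLast hL]
  simp [PySem.List.slice_to_neg_one, List.drop_length_sub_one hL, ← List.dropLast_eq_take]

lemma rot_step (L : List Char) (hL : L ≠ []) (m : Nat) (hm1 : 1 ≤ m) (hmn : m ≤ L.length) :
    rotA (L.drop m ++ L.take m) = L.drop (m-1) ++ L.take (m-1) := by
  have htm : (L.take m).length = m := by rw [List.length_take]; omega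
  have hdm : (L.drop m).length = L.length - m := by simp
  have hlen : (L.drop m ++ L.take m).length = L.length := by simp; omega
  have hX : (L.drop m ++ L.take m) ≠ [] := by
    intro h; rw [h] at hlen; simp at hlen
    exact hL (List.eq_nil_of_length_eq_zero hlen.symm)
  rw [rotA_eq _ hX, hlen, List.drop_append, List.take_append, hdm]
  have e1 : (L.drop m).drop (L.length - 1) = [] := by
    apply List.drop_eq_nil_of_le; omega
  have e2 : L.length - 1 - (L.length - m) = m - 1 := by omega
  have e3 : (L.drop m).take (L.length - 1) = L.drop m := by
    apply List.take_of_length_le; omega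
  have e4 : (L.take m).take (m-1) = L.take (m-1) := by
    rw [List.take_take]; congr 1; omega
  rw [e1, e2, e3, e4]
  have goal_lhs : L.drop (m-1) = (L.take m).drop (m-1) ++ L.drop m := by
    conv_lhs => rw [← List.take_append_drop m L]
    rw [List.drop_append, htm]
    have : m - 1 - m = 0 := by omega
    rw [this, List.drop_zero]
  rw [goal_lhs]
  simp [List.append_assoc]

lemma rot_pow (L : List Char) (hL : L ≠ []) :
    ∀ k, k ≤ L.length → rotA^[k] L = L.drop (L.length - k) ++ L.take (L.length - k) := by
  intro k
  induction k with
  | zero => intro _; simp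
  | succ k ih =>
    intro hk
    rw [Function.iterate_succ_apply', ih (by omega), rot_step L hL (L.length - k) (by omega) (by omega)]
    have e : L.length - k - 1 = L.length - (k + 1) := by omega
    rw [e]

lemma rot_full (L : List Char) (hL : L ≠ []) : rotA^[L.length] L = L := by
  rw [rot_pow L hL L.length le_rfl]; simp

lemma rot_len (L : List Char) (hL : L ≠ []) : ∀ j, (rotA^[j] L).length = L.length := by
  intro j
  induction j with
  | zero => simp
  | succ j ih =>
    rw [Function.iterate_succ_apply']
    have hne : rotA^[j] L ≠ [] := by
      intro h; rw [h] at ih; simp at ih; exact hL (List.eq_nil_of_length_eq_zero ih.symm)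
    rw [rotA_eq _ hne]; simp; omega

lemma rot_periodic (L : List Char) (p : Nat) (hp : rotA^[p] L = L) :
    ∀ j, rotA^[j + p] L = rotA^[j] L := by
  intro j
  rw [Function.iterate_add_apply, hp]

lemma notB_all (L Bl : List Char) (p : Nat) (hp0 : 0 < p) (hcyc : rotA^[p] L = L)
    (hlow : ∀ j, j < p → rotA^[j] L ≠ Bl) : ∀ j, rotA^[j] L ≠ Bl := by
  intro j
  induction j using Nat.strong_induction_on with
  | _ j ih =>
    by_cases h : j < p
    · exact hlow j h
    · have : j = (j - p) + p := by omega
      rw [this, rot_periodic L p hcyc]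
      exact ih (j - p) (by omega)

lemma specAux_none (L Bl : List Char) (h : ∀ j, rotA^[j] L ≠ Bl) :
    ∀ m, specAux L Bl m = -1 := by
  have key : ∀ d m, L.length + 1 - m ≤ d → specAux L Bl m = -1 := by
    intro d
    induction d with
    | zero =>
      intro m hm
      unfold specAux
      rw [if_pos (by omega)]
    | succ d ih =>
      intro m hm
      unfold specAux
      split_ifs with h1 h2
      · rfl
      · exact absurd h2 (h m)
      · exact ih (m+1) (by omega)
  intro m
  exact key (L.length + 1 - m) m le_rfl

lemma loop_eq (L Bl : List Char) (hL : L ≠ []) :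
    ∀ fuel k, (∀ j, j < k → rotA^[j] L ≠ Bl) → (∀ j, 1 ≤ j → j ≤ k → rotA^[j] L ≠ L) →
      L.length + 1 ≤ k + fuel →
      solutionLoop L Bl fuel (rotA^[k] L) (k : Int) = specAux L Bl k := by
  have hn1 : 1 ≤ L.length := by
    cases L with
    | nil => exact absurd rfl hL
    | cons a l => simp
  intro fuel
  induction fuel with
  | zero =>
    intro k _ H2 hf
    exact absurd (rot_full L hL) (H2 L.length hn1 (by omega))
  | succ fuel ih =>
    intro k H1 H2 hf
    have hkn : k < L.length := by
      by_contra h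
      exact H2 L.length hn1 (by omega) (rot_full L hL)
    unfold solutionLoop
    unfold specAux
    rw [if_neg (by omega : ¬ L.length + 1 ≤ k)]
    by_cases hB : rotA^[k] L = Bl
    · rw [if_pos hB, if_pos hB]
    · rw [if_neg hB, if_neg hB]
      have hsucc : rotA (rotA^[k] L) = rotA^[k+1] L := (Function.iterate_succ_apply' rotA k L).symm
      show (if L = rotA (rotA^[k] L) then (-1 : Int)
            else solutionLoop L Bl fuel (rotA (rotA^[k] L)) ((k : Int) + 1)) = specAux L Bl (k + 1)
      have hext : ∀ j, j < k + 1 → rotA^[j] L ≠ Bl := by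
        intro j hj
        by_cases hjk : j < k
        · exact H1 j hjk
        · have : j = k := by omega
          rw [this]; exact hB
      by_cases hc : L = rotA (rotA^[k] L)
      · rw [if_pos hc]
        have hcyc : rotA^[k+1] L = L := by rw [← hsucc, ← hc]
        have hall : ∀ j, rotA^[j] L ≠ Bl := notB_all L Bl (k+1) (by omega) hcyc hext
        rw [specAux_none L Bl hall (k+1)]
      · rw [if_neg hc]
        have : solutionLoop L Bl fuel (rotA (rotA^[k] L)) ((k : Int) + 1)
            = solutionLoop L Bl fuel (rotA^[k+1] L) ((k+1 : Nat) : Int) := by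
          rw [hsucc]; norm_num
        rw [this]
        apply ih (k+1) hext
        · intro j hj1 hj2
          by_cases hjk : j ≤ k
          · exact H2 j hj1 hjk
          · have : j = k + 1 := by omega
            rw [this, ← hsucc]
            intro hcontra
            exact hc hcontra.symm
        · omega

lemma window_eq (L Bl : List Char) (hlen : Bl.length = L.length) (i : Nat) (hi : i ≤ L.length) :
    ((L ++ L).drop i).take Bl.length = L.drop i ++ L.take i := by
  rw [hlen, List.drop_append]
  have e0 : i - L.length = 0 := by omega
  rw [e0, List.drop_zero, List.take_append]
  have e1 : (L.drop i).take L.length = L.drop i := by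
    apply List.take_of_length_le; simp
  have e2 : L.length - (L.drop i).length = i := by simp; omega
  rw [e1, e2]

lemma rot_window (L : List Char) (hL : L ≠ []) (i : Nat) (hi : i ≤ L.length) :
    rotA^[L.length - i] L = L.drop i ++ L.take i := by
  rw [rot_pow L hL (L.length - i) (by omega)]
  have e : L.length - (L.length - i) = i := by omega
  rw [e]

lemma rfind_eq (L Bl : List Char) (hL : L ≠ []) (hlen : Bl.length = L.length) :
    ∀ i, i ≤ L.length →
      (if rfindAux (L ++ L) Bl i < 0 then -1 else (L.length : Int) - rfindAux (L ++ L) Bl i)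
        = specAux L Bl (L.length - i) := by
  intro i
  induction i with
  | zero =>
    intro _
    unfold rfindAux
    rw [window_eq L Bl hlen 0 (by omega)]
    simp only [List.drop_zero, List.take_zero, List.append_nil, Nat.sub_zero]
    by_cases h0 : L = Bl
    · rw [if_pos h0]
      rw [if_neg (by omega : ¬ ((0 : Nat) : Int) < 0)]
      unfold specAux
      rw [if_neg (by omega), if_pos (by rw [rot_full L hL]; exact h0)]
      norm_num
    · rw [if_neg h0]
      norm_num
      unfold specAux
      rw [if_neg (by omega), if_neg (by rw [rot_full L hL]; exact h0)]
      unfold specAux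
      rw [if_pos (by omega)]
  | succ i ih =>
    intro hi
    unfold rfindAux
    rw [window_eq L Bl hlen (i+1) hi]
    by_cases hc : L.drop (i+1) ++ L.take (i+1) = Bl
    · rw [if_pos hc]
      have hnn : ¬ ((i+1 : Nat) : Int) < 0 := by omega
      rw [if_neg hnn]
      unfold specAux
      rw [if_neg (by omega), if_pos (by rw [rot_window L hL (i+1) hi]; exact hc)]
      push_cast
      omega
    · rw [if_neg hc]
      rw [ih (by omega)]
      conv_rhs => unfold specAux
      rw [if_neg (by omega), if_neg (by rw [rot_window L hL (i+1) hi]; exact hc)]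
      congr 1
      omega

lemma main_eq (A B : String) (hpre : A = "" → B = "") : solution A B = solution_alt A B := by
  by_cases hA : A = ""
  · rw [hA, hpre hA]
    simp [solution, solution_alt, solutionLoop, pyRfind, rfindAux]
  · have hL : A.toList ≠ [] := by
      intro h
      exact hA (by rwa [← String.toList_eq_nil_iff])
    simp only [solution, solution_alt]
    have hloop : solutionLoop A.toList B.toList (A.toList.length + 1) A.toList 0
        = specAux A.toList B.toList 0 := by
      have := loop_eq A.toList B.toList hL (A.toList.length + 1) 0
        (by intro j hj; omega) (by intro j h1 h2; omega) (by omega)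
      simpa using this
    rw [hloop]
    by_cases hlen : B.toList.length = A.toList.length
    · rw [if_neg (by omega)]
      unfold pyRfind
      have hle : B.toList.length ≤ (A.toList ++ A.toList).length := by
        rw [List.length_append]; omega
      rw [if_pos hle]
      have harg : (A.toList ++ A.toList).length - B.toList.length = A.toList.length := by
        rw [List.length_append, hlen]; omega
      rw [harg]
      have := rfind_eq A.toList B.toList hL hlen A.toList.length le_rfl
      rw [Nat.sub_self] at this
      rw [← this]
    · rw [if_pos (by omega)]
      apply specAux_none
      intro j hj
      apply hlen
      rw [← hj]
      exact rot_len A.toList hL j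


-- ===== VERDICT (by name: the statement is the Claim_ definition above) =====
theorem solution_spec : Claim_equal_solution := by
  intro A B _ hpre
  exact main_eq A B hpre
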